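-- pv_equiv track=rewrite | github.com/wilmurillo-ai/Design-Assistant | .skills/openclaw-skills/skills/shermanxli/datayes-stock-data/scripts/datayes_api.py | _partition_params
-- ===== SOURCE A (Python) =====
-- from typing import Any
--
-- def _partition_params(params: dict[str, Any], allowed: dict[str, dict[str, Any]]) -> tuple[dict[str, Any], dict[str, Any], dict[str, Any]]:
--     query_params: dict[str, Any] = {}
--     body_params: dict[str, Any] = {}
--     path_params: dict[str, Any] = {}
--
--     for key, value in params.items():
--         location = str(allowed[key].get("location") or "Query").lower()
--         if location == "query":
--             query_params[key] = value
--         elif location == "body":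
--             body_params[key] = value
--         elif location == "path":
--             path_params[key] = value
--         else:
--             query_params[key] = value
--
--     return query_params, body_params, path_params
-- ===== SOURCE B (Python) =====
-- def _partition_params(params, allowed):
--     def loc(key):
--         return str(allowed[key].get("location") or "Query").lower()
--
--     query_params = {k: v for k, v in params.items() if loc(k) not in ("body", "path")}
--     body_params = {k: v for k, v in params.items() if loc(k) == "body"}
--     path_params = {k: v for k, v in params.items() if loc(k) == "path"}
--     return query_params, body_params, path_params
-- ===== Notes on version B (the rewrite author's own statement) =====
-- stated objective: alternative
-- what changed: Replaces A's single elif-routing loop over three mutable accumulators with three independent dict comprehensions over params.items(), each selecting one location class (query = not body/path).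
import Mathlib
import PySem

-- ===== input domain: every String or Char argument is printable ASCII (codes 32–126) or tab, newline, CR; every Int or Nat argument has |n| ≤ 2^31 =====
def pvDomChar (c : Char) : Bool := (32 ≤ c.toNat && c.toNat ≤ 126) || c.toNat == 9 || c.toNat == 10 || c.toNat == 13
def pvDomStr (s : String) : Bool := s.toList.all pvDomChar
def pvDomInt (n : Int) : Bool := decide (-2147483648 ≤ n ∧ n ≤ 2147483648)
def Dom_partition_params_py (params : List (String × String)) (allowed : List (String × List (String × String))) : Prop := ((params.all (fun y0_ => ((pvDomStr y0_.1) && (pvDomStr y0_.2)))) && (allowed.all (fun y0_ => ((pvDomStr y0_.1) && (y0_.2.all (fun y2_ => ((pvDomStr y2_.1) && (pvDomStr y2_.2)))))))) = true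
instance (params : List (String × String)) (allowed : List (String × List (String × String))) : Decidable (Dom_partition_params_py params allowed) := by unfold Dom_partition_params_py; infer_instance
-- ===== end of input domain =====

-- B is an alternative decomposition (three independent filtering comprehensions instead of one routing loop); equivalence is about the return value only (neither version mutates its arguments).

-- ===== PORT A =====
-- shared helper: str(allowed[key].get("location") or "Query").lower()  (both Pythons contain this exact expression)
def pvLoc (allowed : List (String × List (String × String))) (k : String) : String :=
  let inner : PySem.Dict String String := PySem.Dict.mk (((PySem.Dict.ofList allowed).get? k).getD [])
  let raw := (inner.get? "location").getD ""     -- Pre_ guarantees k ∈ allowed; 'or' sees "" / missing as falsy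
  PySem.Str.lower (if raw == "" then "Query" else raw)

def pvStepA (allowed : List (String × List (String × String)))
    (acc : PySem.Dict String String × PySem.Dict String String × PySem.Dict String String)
    (kv : String × String) :
    PySem.Dict String String × PySem.Dict String String × PySem.Dict String String :=
  let location := pvLoc allowed kv.1
  if location == "query" then (acc.1.insert kv.1 kv.2, acc.2.1, acc.2.2)
  else if location == "body" then (acc.1, acc.2.1.insert kv.1 kv.2, acc.2.2)
  else if location == "path" then (acc.1, acc.2.1, acc.2.2.insert kv.1 kv.2)
  else (acc.1.insert kv.1 kv.2, acc.2.1, acc.2.2)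

def partition_params_py (params : List (String × String)) (allowed : List (String × List (String × String))) : (List (String × String)) × (List (String × String)) × (List (String × String)) :=
  let r := params.foldl (pvStepA allowed) (PySem.Dict.empty, PySem.Dict.empty, PySem.Dict.empty)
  (r.1.items, r.2.1.items, r.2.2.items)

-- ===== PORT B =====
def partition_params_py_alt (params : List (String × String)) (allowed : List (String × List (String × String))) : (List (String × String)) × (List (String × String)) × (List (String × String)) :=
  let query_params := PySem.Dict.ofList (params.filter (fun kv => !(pvLoc allowed kv.1 == "body" || pvLoc allowed kv.1 == "path")))
  let body_params := PySem.Dict.ofList (params.filter (fun kv => pvLoc allowed kv.1 == "body"))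
  let path_params := PySem.Dict.ofList (params.filter (fun kv => pvLoc allowed kv.1 == "path"))
  (query_params.items, body_params.items, path_params.items)

-- ===== PRECONDITION & SPEC =====
-- Pre_ excludes params keys missing from allowed (A raises KeyError there) and, per the dict
-- convention, lists with duplicate keys (no Python dict produces them).
def Pre_partition_params_py (params : List (String × String)) (allowed : List (String × List (String × String))) : Prop :=
  (params.map Prod.fst).Nodup ∧ ∀ k ∈ params.map Prod.fst, k ∈ allowed.map Prod.fst
instance (params : List (String × String)) (allowed : List (String × List (String × String))) : Decidable (Pre_partition_params_py params allowed) := by unfold Pre_partition_params_py; infer_instance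

def pvWitness_partition_params_py : (List (String × String)) × (List (String × List (String × String))) :=
  ([("a", "1"), ("b", "2"), ("c", "3")], [("a", [("location", "Body")]), ("b", []), ("c", [("location", "path")])])

def Spec_partition_params_py (params : List (String × String)) (allowed : List (String × List (String × String))) (out : (List (String × String)) × (List (String × String)) × (List (String × String))) : Prop := out = partition_params_py_alt params allowed
instance (params : List (String × String)) (allowed : List (String × List (String × String))) (out : (List (String × String)) × (List (String × String)) × (List (String × String))) : Decidable (Spec_partition_params_py params allowed out) := by unfold Spec_partition_params_py; infer_instance

-- ===== CLAIM (what is proved, stated in full; the proofs are below) =====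
def Claim_equal_partition_params_py : Prop := ∀ (params : List (String × String)) (allowed : List (String × List (String × String))), Dom_partition_params_py params allowed → Pre_partition_params_py params allowed → Spec_partition_params_py params allowed (partition_params_py params allowed)

-- ===== LEMMAS AND PROOFS =====

lemma pv_loop_eq (allowed : List (String × List (String × String)))
    (params : List (String × String))
    (q b p : PySem.Dict String String)
    (hnd : (params.map Prod.fst).Nodup)
    (hq : ∀ k ∈ params.map Prod.fst, q.contains k = false)
    (hb : ∀ k ∈ params.map Prod.fst, b.contains k = false)
    (hp : ∀ k ∈ params.map Prod.fst, p.contains k = false) :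
    (params.foldl (pvStepA allowed) (q, b, p)).1.items
        = q.items ++ params.filter (fun kv => !(pvLoc allowed kv.1 == "body" || pvLoc allowed kv.1 == "path")) ∧
    (params.foldl (pvStepA allowed) (q, b, p)).2.1.items
        = b.items ++ params.filter (fun kv => pvLoc allowed kv.1 == "body") ∧
    (params.foldl (pvStepA allowed) (q, b, p)).2.2.items
        = p.items ++ params.filter (fun kv => pvLoc allowed kv.1 == "path") := by
  induction params generalizing q b p with
  | nil => simp
  | cons kv rest ih =>
    simp only [List.map_cons, List.nodup_cons, List.mem_cons] at hnd hq hb hp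
    have hqk := hq kv.1 (Or.inl rfl)
    have hbk := hb kv.1 (Or.inl rfl)
    have hpk := hp kv.1 (Or.inl rfl)
    have fresh : ∀ (d : PySem.Dict String String) (w : String),
        (∀ k, k = kv.1 ∨ k ∈ rest.map Prod.fst → d.contains k = false) →
        ∀ k ∈ rest.map Prod.fst, (d.insert kv.1 w).contains k = false := by
      intro d w hd k hk
      rw [PySem.Dict.contains_insert]
      have : (k == kv.1) = false := by
        simp only [beq_eq_false_iff_ne, ne_eq]
        intro h; exact hnd.1 (h ▸ hk)
      simp [this, hd k (Or.inr hk)]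
    have hq' := fun k hk => hq k (Or.inr hk)
    have hb' := fun k hk => hb k (Or.inr hk)
    have hp' := fun k hk => hp k (Or.inr hk)
    simp only [List.foldl_cons]
    by_cases hbody : pvLoc allowed kv.1 = "body"
    · have hstep : pvStepA allowed (q, b, p) kv = (q, b.insert kv.1 kv.2, p) := by
        simp [pvStepA, hbody]
      rw [hstep]
      obtain ⟨e1, e2, e3⟩ := ih q (b.insert kv.1 kv.2) p hnd.2 hq' (fresh b kv.2 hb) hp'
      refine ⟨?_, ?_, ?_⟩
      · rw [e1]; simp [hbody]
      · rw [e2, PySem.Dict.items_insert_of_not_contains b kv.2 hbk]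
        simp [hbody]
      · rw [e3]; simp [hbody]
    · by_cases hpath : pvLoc allowed kv.1 = "path"
      · have hstep : pvStepA allowed (q, b, p) kv = (q, b, p.insert kv.1 kv.2) := by
          simp [pvStepA, hpath]
        rw [hstep]
        obtain ⟨e1, e2, e3⟩ := ih q b (p.insert kv.1 kv.2) hnd.2 hq' hb' (fresh p kv.2 hp)
        refine ⟨?_, ?_, ?_⟩
        · rw [e1]; simp [hpath]
        · rw [e2]; simp [hpath]
        · rw [e3, PySem.Dict.items_insert_of_not_contains p kv.2 hpk]
          simp [hpath]
      · have hstep : pvStepA allowed (q, b, p) kv = (q.insert kv.1 kv.2, b, p) := by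
          by_cases hquery : pvLoc allowed kv.1 = "query" <;>
            simp [pvStepA, hquery, hbody, hpath]
        rw [hstep]
        obtain ⟨e1, e2, e3⟩ := ih (q.insert kv.1 kv.2) b p hnd.2 (fresh q kv.2 hq) hb' hp'
        refine ⟨?_, ?_, ?_⟩
        · rw [e1, PySem.Dict.items_insert_of_not_contains q kv.2 hqk]
          simp [hbody, hpath]
        · rw [e2]; simp [hbody]
        · rw [e3]; simp [hpath]

lemma pv_ofList_items (l : List (String × String)) (hnd : (l.map Prod.fst).Nodup) :
    (PySem.Dict.ofList l).items = l := by
  have h := PySem.Dict.items_foldl_insert_fresh l Prod.fst Prod.snd PySem.Dict.empty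
    (fun a _ => PySem.Dict.contains_empty a.1) hnd
  simpa using h

-- ===== VERDICT (by name: the statement is the Claim_ definition above) =====
theorem partition_params_py_spec : Claim_equal_partition_params_py := by
  intro params allowed _ hpre
  unfold Spec_partition_params_py partition_params_py partition_params_py_alt
  obtain ⟨hnd, _⟩ := hpre
  have h := pv_loop_eq allowed params PySem.Dict.empty PySem.Dict.empty PySem.Dict.empty hnd
    (by intro k _; exact PySem.Dict.contains_empty k)
    (by intro k _; exact PySem.Dict.contains_empty k)
    (by intro k _; exact PySem.Dict.contains_empty k)
  obtain ⟨e1, e2, e3⟩ := h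
  have nd : ∀ (f : String × String → Bool), ((params.filter f).map Prod.fst).Nodup :=
    fun f => hnd.sublist ((List.filter_sublist (p := f) (l := params)).map Prod.fst)
  dsimp only
  rw [e1, e2, e3, pv_ofList_items _ (nd _), pv_ofList_items _ (nd _), pv_ofList_items _ (nd _)]
  rfl
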